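-- pv_equiv track=rewrite | github.com/elliott-not-available/leetcode | find_the_maximum_sum_of_node_values_3068.py | maximumValueSum
-- ===== SOURCE A (Python) =====
-- def maximumValueSum(nums: list[int], k: int, edges: list[list[int]]) -> int:
--     # greedy
--
--     s = 0
--     res = []
--
--     # build cur sum with 0 ops and ^ diff array
--     for x in nums:
--         s += x
--         y = x ^ k
--         res.append(y - x)
--
--     # sort so largest diff are first
--     res.sort(reverse=True)
--
--     # for every other item check if they are larger than 0
--     # if so add to sum
--     for i in range(0, len(res) - 1, 2):
--
--         if res[i] + res[i+1] <= 0: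
--             break
--
--         s += res[i] + res[i+1]
--
--
--     return s
-- ===== SOURCE B (Python) =====
-- def maximumValueSum(nums: list[int], k: int, edges: list[list[int]]) -> int:
--     # single pass, no sort: track base sum, sum of positive xor-diffs,
--     # parity of their count, smallest positive diff, largest nonpositive diff
--     s = 0
--     sumpos = 0
--     odd = False
--     minpos = None
--     maxnp = None
--     for x in nums:
--         s += x
--         d = (x ^ k) - x
--         if d > 0:
--             sumpos += d
--             odd = not odd
--             if minpos is None or d < minpos:
--                 minpos = d
--         else:
--             if maxnp is None or d > maxnp:
--                 maxnp = d
--     if not odd: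
--         return s + sumpos
--     if maxnp is None:
--         return s + sumpos - minpos
--     return s + sumpos - minpos + max(0, minpos + maxnp)
-- ===== Notes on version B (the rewrite author's own statement) =====
-- stated objective: faster
-- what changed: replaced A's build-diff-array, sort descending, pair-up-and-break greedy with a single unsorted pass that tracks the base sum, the sum of positive xor-diffs, their count parity, the smallest positive diff and the largest nonpositive diff, then combines them in a closed form
import Mathlib
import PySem

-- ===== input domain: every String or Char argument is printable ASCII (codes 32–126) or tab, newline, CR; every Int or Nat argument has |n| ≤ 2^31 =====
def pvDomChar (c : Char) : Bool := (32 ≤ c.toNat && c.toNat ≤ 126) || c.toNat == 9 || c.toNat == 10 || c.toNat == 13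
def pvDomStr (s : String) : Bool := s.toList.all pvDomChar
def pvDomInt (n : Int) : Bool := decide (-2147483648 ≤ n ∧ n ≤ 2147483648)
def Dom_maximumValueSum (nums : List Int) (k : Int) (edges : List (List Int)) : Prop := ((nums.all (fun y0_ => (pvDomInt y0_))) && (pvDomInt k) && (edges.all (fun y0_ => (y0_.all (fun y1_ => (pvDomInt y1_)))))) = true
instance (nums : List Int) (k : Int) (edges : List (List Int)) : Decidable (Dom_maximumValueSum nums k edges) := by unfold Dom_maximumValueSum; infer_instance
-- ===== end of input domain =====

-- B replaces A's sort-then-pair greedy loop by a single pass tracking the sum of positive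
-- xor-diffs, their count parity, the smallest positive diff and the largest nonpositive diff
-- (objective: faster, O(n) instead of O(n log n)).

-- ===== PORT A =====
-- the ^-diff of one element: (x ^ k) - x
def pvDiff (k x : Int) : Int := PySem.Int.bxor x k - x

-- the 'for i in range(0, len(res)-1, 2)' loop with its break: consumes two elements
-- per step, stops at the first nonpositive pair sum, ignores a trailing element
def pvLoopA : List Int → Int
  | a :: b :: rest => if a + b ≤ 0 then 0 else a + b + pvLoopA rest
  | _ => 0

def maximumValueSum (nums : List Int) (k : Int) (edges : List (List Int)) : Int :=
  let sr := nums.foldl (fun (p : Int × List Int) x => (p.1 + x, p.2 ++ [pvDiff k x])) (0, [])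
  let res := PySem.List.sorted sr.2 (fun d => d) true
  sr.1 + pvLoopA res

-- ===== PORT B =====
-- state: (s, sumpos, odd, minpos, maxnp)
def pvStepB (k : Int) (st : Int × Int × Bool × Option Int × Option Int) (x : Int) :
    Int × Int × Bool × Option Int × Option Int :=
  let d := pvDiff k x
  if 0 < d then
    (st.1 + x, st.2.1 + d, !st.2.2.1,
     some (match st.2.2.2.1 with | none => d | some m => if d < m then d else m),
     st.2.2.2.2)
  else
    (st.1 + x, st.2.1, st.2.2.1, st.2.2.2.1,
     some (match st.2.2.2.2 with | none => d | some m => if m < d then d else m))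

def maximumValueSum_alt (nums : List Int) (k : Int) (edges : List (List Int)) : Int :=
  let st := nums.foldl (pvStepB k) (0, 0, false, none, none)
  if !st.2.2.1 then st.1 + st.2.1
  else
    match st.2.2.2.2 with
    | none => st.1 + st.2.1 - st.2.2.2.1.getD 0   -- minpos is never none when odd is true
    | some n => st.1 + st.2.1 - st.2.2.2.1.getD 0 + max 0 (st.2.2.2.1.getD 0 + n)

-- ===== PRECONDITION & SPEC =====
def Spec_maximumValueSum (nums : List Int) (k : Int) (edges : List (List Int)) (out : Int) : Prop := out = maximumValueSum_alt nums k edges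
instance (nums : List Int) (k : Int) (edges : List (List Int)) (out : Int) : Decidable (Spec_maximumValueSum nums k edges out) := by unfold Spec_maximumValueSum; infer_instance

-- ===== CLAIM (what is proved, stated in full; the proofs are below) =====
def Claim_equal_maximumValueSum : Prop := ∀ (nums : List Int) (k : Int) (edges : List (List Int)), Dom_maximumValueSum nums k edges → Spec_maximumValueSum nums k edges (maximumValueSum nums k edges)

-- ===== LEMMAS AND PROOFS =====

-- diff list, its positive and nonpositive parts
def pvDs (k : Int) (nums : List Int) : List Int := nums.map (pvDiff k)
def pvP (l : List Int) : List Int := l.filter (fun d => decide (0 < d))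
def pvN (l : List Int) : List Int := l.filter (fun d => !decide (0 < d))

-- option-combining min/max (mirroring the running minpos/maxnp accumulators)
def pvOMin : Option Int → Option Int → Option Int
  | none, y => y
  | some m, none => some m
  | some m, some v => some (min m v)
def pvOMax : Option Int → Option Int → Option Int
  | none, y => y
  | some m, none => some m
  | some m, some v => some (max m v)

-- the closed form B computes, expressed over the diff list
def pvG (l : List Int) : Int :=
  if (pvP l).length % 2 = 0 then (pvP l).sum
  else
    match (pvN l).max? with
    | none => (pvP l).sum - (pvP l).min?.getD 0
    | some n => (pvP l).sum - (pvP l).min?.getD 0 + max 0 ((pvP l).min?.getD 0 + n)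

theorem pvFoldA (k : Int) : ∀ (nums : List Int) (s : Int) (r : List Int),
    nums.foldl (fun (p : Int × List Int) x => (p.1 + x, p.2 ++ [pvDiff k x])) (s, r)
      = (s + nums.sum, r ++ pvDs k nums) := by
  intro nums
  induction nums with
  | nil => intro s r; simp [pvDs]
  | cons x t ih => intro s r; simp [pvDs, ih, List.sum_cons]; ring

theorem pvMin?_cons (a : Int) (t : List Int) : (a :: t).min? = pvOMin (some a) t.min? := by
  rw [List.min?_cons]
  cases t.min? <;> simp [pvOMin, Option.elim]

theorem pvMax?_cons (a : Int) (t : List Int) : (a :: t).max? = pvOMax (some a) t.max? := by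
  rw [List.max?_cons]
  cases t.max? <;> simp [pvOMax, Option.elim]

theorem pvOMin_assoc (a b c : Option Int) : pvOMin (pvOMin a b) c = pvOMin a (pvOMin b c) := by
  cases a <;> cases b <;> cases c <;> simp [pvOMin, min_assoc]

theorem pvOMax_assoc (a b c : Option Int) : pvOMax (pvOMax a b) c = pvOMax a (pvOMax b c) := by
  cases a <;> cases b <;> cases c <;> simp [pvOMax, max_assoc]

theorem pvOMin_comm (a b : Option Int) : pvOMin a b = pvOMin b a := by
  cases a <;> cases b <;> simp [pvOMin, min_comm]

theorem pvOMax_comm (a b : Option Int) : pvOMax a b = pvOMax b a := by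
  cases a <;> cases b <;> simp [pvOMax, max_comm]

theorem pvFoldB (k : Int) : ∀ (nums : List Int) (s sp : Int) (odd : Bool) (mp mn : Option Int),
    nums.foldl (pvStepB k) (s, sp, odd, mp, mn)
      = (s + nums.sum, sp + (pvP (pvDs k nums)).sum,
         odd ^^ decide ((pvP (pvDs k nums)).length % 2 = 1),
         pvOMin mp (pvP (pvDs k nums)).min?,
         pvOMax mn (pvN (pvDs k nums)).max?) := by
  intro nums
  induction nums with
  | nil =>
    intro s sp odd mp mn
    cases mp <;> cases mn <;> simp [pvDs, pvP, pvN, pvOMin, pvOMax]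
  | cons x t ih =>
    intro s sp odd mp mn
    by_cases hd : 0 < pvDiff k x
    · rw [List.foldl_cons]
      have hstep : pvStepB k (s, sp, odd, mp, mn) x
          = (s + x, sp + pvDiff k x, !odd, pvOMin mp (some (pvDiff k x)), mn) := by
        simp [pvStepB, hd]
        cases mp <;> simp [pvOMin, min_def]
        split <;> split <;> omega
      have hfP : pvP (pvDs k (x :: t)) = pvDiff k x :: pvP (pvDs k t) := by
        simp [pvDs, pvP, List.filter_cons, hd]
      have hfN : pvN (pvDs k (x :: t)) = pvN (pvDs k t) := by
        simp [pvDs, pvN, List.filter_cons, hd]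
      have hparity : ∀ n : Nat, ((!odd) ^^ decide (n % 2 = 1)) = (odd ^^ decide ((n + 1) % 2 = 1)) := by
        intro n
        rcases Nat.mod_two_eq_zero_or_one n with h | h <;>
          cases odd <;> simp [h, Nat.add_mod] <;> omega
      rw [hstep, ih, hfP, hfN, pvMin?_cons]
      simp only [List.sum_cons, List.length_cons, Prod.mk.injEq, hparity, pvOMin_assoc,
        and_true, true_and]
      simp [add_assoc]
    · rw [List.foldl_cons]
      have hstep : pvStepB k (s, sp, odd, mp, mn) x
          = (s + x, sp, odd, mp, pvOMax mn (some (pvDiff k x))) := by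
        simp [pvStepB, hd]
        cases mn <;> simp [pvOMax, max_def]
        split <;> split <;> omega
      have hfP : pvP (pvDs k (x :: t)) = pvP (pvDs k t) := by
        simp [pvDs, pvP, List.filter_cons, hd]
      have hfN : pvN (pvDs k (x :: t)) = pvDiff k x :: pvN (pvDs k t) := by
        simp [pvDs, pvN, List.filter_cons, hd]
      rw [hstep, ih, hfP, hfN, pvMax?_cons]
      simp only [List.sum_cons, Prod.mk.injEq, pvOMax_assoc, and_true, true_and]
      ring

theorem pvMin?_perm {l l' : List Int} (h : l.Perm l') : l.min? = l'.min? := by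
  induction h with
  | nil => rfl
  | cons x _ ih => rw [pvMin?_cons, pvMin?_cons, ih]
  | swap x y l =>
    rw [pvMin?_cons, pvMin?_cons, pvMin?_cons, pvMin?_cons,
      ← pvOMin_assoc, ← pvOMin_assoc, pvOMin_comm (some y) (some x)]
  | trans _ _ ih1 ih2 => rw [ih1, ih2]

theorem pvMax?_perm {l l' : List Int} (h : l.Perm l') : l.max? = l'.max? := by
  induction h with
  | nil => rfl
  | cons x _ ih => rw [pvMax?_cons, pvMax?_cons, ih]
  | swap x y l =>
    rw [pvMax?_cons, pvMax?_cons, pvMax?_cons, pvMax?_cons,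
      ← pvOMax_assoc, ← pvOMax_assoc, pvOMax_comm (some y) (some x)]
  | trans _ _ ih1 ih2 => rw [ih1, ih2]

theorem pvG_perm {l l' : List Int} (h : l.Perm l') : pvG l = pvG l' := by
  have hp : (pvP l).Perm (pvP l') := h.filter _
  have hn : (pvN l).Perm (pvN l') := h.filter _
  simp [pvG, hp.length_eq, hp.sum_eq, pvMin?_perm hp, pvMax?_perm hn]

theorem pvP_nil {l : List Int} (h : ∀ y ∈ l, y ≤ 0) : pvP l = [] := by
  refine List.filter_eq_nil_iff.mpr ?_
  intro a ha
  simpa using not_lt.mpr (h a ha)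

theorem pvN_self {l : List Int} (h : ∀ y ∈ l, y ≤ 0) : pvN l = l := by
  refine List.filter_eq_self.mpr ?_
  intro a ha
  simpa using not_lt.mpr (h a ha)

theorem pvMax?_head {b : Int} {rest : List Int} (h : ∀ y ∈ rest, y ≤ b) :
    (b :: rest).max? = some b := by
  rw [pvMax?_cons]
  cases hr : rest.max? with
  | none => simp [pvOMax]
  | some v => simp [pvOMax, max_eq_left (h v (List.max?_mem hr))]

theorem pvMin?_two {a b : Int} {P : List Int} (hP : P ≠ []) (hb : ∀ y ∈ P, y ≤ b)
    (hab : b ≤ a) : (a :: b :: P).min? = P.min? := by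
  rw [pvMin?_cons, pvMin?_cons]
  cases hp : P.min? with
  | none => exact absurd (List.min?_eq_none_iff.mp hp) hP
  | some v =>
    have hv : v ∈ P := List.min?_mem hp
    simp [pvOMin, min_eq_right (hb v hv), min_eq_right (le_trans (hb v hv) hab)]

-- the loop on a nonincreasing list computes the closed form
theorem pvLoopA_eq_G : ∀ l : List Int, l.Pairwise (fun a b => b ≤ a) → pvLoopA l = pvG l := by
  intro l
  induction l using pvLoopA.induct with
  | case1 a b rest h =>
    intro hpw
    rw [List.pairwise_cons] at hpw
    obtain ⟨ha, hpw⟩ := hpw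
    rw [List.pairwise_cons] at hpw
    obtain ⟨hb, _⟩ := hpw
    have hba : b ≤ a := ha b (by simp)
    by_cases hA : a ≤ 0
    · have hall : ∀ y ∈ a :: b :: rest, y ≤ 0 := by
        intro y hy
        rcases List.mem_cons.mp hy with rfl | hy
        · exact hA
        · rcases List.mem_cons.mp hy with rfl | hy
          · exact le_trans hba hA
          · exact le_trans (hb y hy) (le_trans hba hA)
      simp [pvLoopA, h, pvG, pvP_nil hall]
    · rw [not_le] at hA
      have hbneg : b ≤ 0 := by omega
      have hnb : ¬ 0 < b := by omega
      have hP2 : List.filter (fun d => decide (0 < d)) rest = [] := by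
        simpa [pvP] using pvP_nil (l := rest) (fun y hy => le_trans (hb y hy) hbneg)
      have hN2 : List.filter (fun d => !decide (0 < d)) rest = rest := by
        simpa [pvN] using pvN_self (l := rest) (fun y hy => le_trans (hb y hy) hbneg)
      have hPl : pvP (a :: b :: rest) = [a] := by
        simp [pvP, List.filter_cons, hA, hnb, hP2]
      have hNl : pvN (a :: b :: rest) = b :: rest := by
        simp [pvN, List.filter_cons, hA, hnb, hN2]
      have hmax : (b :: rest).max? = some b := pvMax?_head hb
      simp [pvLoopA, h, pvG, hPl, hNl, hmax]
  | case2 a b rest h ih =>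
    intro hpw
    rw [List.pairwise_cons] at hpw
    obtain ⟨ha, hpw⟩ := hpw
    rw [List.pairwise_cons] at hpw
    obtain ⟨hb, hrest⟩ := hpw
    have hba : b ≤ a := ha b (by simp)
    have hA : 0 < a := by omega
    have hL : pvLoopA (a :: b :: rest) = a + b + pvLoopA rest := by
      simp [pvLoopA, h]
    have hloop : pvLoopA rest = pvG rest := ih hrest
    by_cases hB : 0 < b
    · have hPl : pvP (a :: b :: rest) = a :: b :: pvP rest := by
        simp [pvP, List.filter_cons, hA, hB]
      have hNl : pvN (a :: b :: rest) = pvN rest := by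
        simp [pvN, List.filter_cons, hA, hB]
      have hbP : ∀ y ∈ pvP rest, y ≤ b := fun y hy => hb y (List.mem_of_mem_filter hy)
      by_cases he : (pvP rest).length % 2 = 0
      · simp [pvG, hPl, hNl, hL, hloop]
        rw [if_pos (show ((pvP rest).length + 1 + 1) % 2 = 0 by omega), if_pos he]
        ring
      · have he2 : ¬ (a :: b :: pvP rest).length % 2 = 0 := by simp [List.length_cons]; omega
        have hne : pvP rest ≠ [] := by
          intro h0
          rw [h0] at he
          simp at he
        have hmin : (a :: b :: pvP rest).min? = (pvP rest).min? := pvMin?_two hne hbP hba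
        rw [hL, hloop]
        simp only [pvG, hPl, hNl, he, he2, hmin, if_neg, if_pos, List.sum_cons]
        cases (pvN rest).max? <;> simp <;> ring
    · rw [not_lt] at hB
      have hnb : ¬ 0 < b := by omega
      have hP2 : List.filter (fun d => decide (0 < d)) rest = [] := by
        simpa [pvP] using pvP_nil (l := rest) (fun y hy => le_trans (hb y hy) hB)
      have hN2 : List.filter (fun d => !decide (0 < d)) rest = rest := by
        simpa [pvN] using pvN_self (l := rest) (fun y hy => le_trans (hb y hy) hB)
      have hPl : pvP (a :: b :: rest) = [a] := by
        simp [pvP, List.filter_cons, hA, hnb, hP2]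
      have hNl : pvN (a :: b :: rest) = b :: rest := by
        simp [pvN, List.filter_cons, hA, hnb, hN2]
      have hmax : (b :: rest).max? = some b := pvMax?_head hb
      have hPrest : pvP rest = [] := by
        refine pvP_nil ?_
        intro y hy
        exact le_trans (hb y hy) hB
      have hGrest : pvG rest = 0 := by simp [pvG, hPrest]
      rw [hL, hloop, hGrest]
      simp [pvG, hPl, hNl, hmax]
      omega
  | case3 t hx =>
    intro _
    rcases t with _ | ⟨a, _ | ⟨b, rest⟩⟩
    · simp [pvLoopA, pvG, pvP, pvN]
    · by_cases hA : 0 < a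
      · simp [pvLoopA, pvG, pvP, pvN, hA]
      · simp [pvLoopA, pvG, pvP, pvN, hA]
    · exact absurd rfl (hx a b rest)

theorem pvA_eq (nums : List Int) (k : Int) (edges : List (List Int)) :
    maximumValueSum nums k edges = nums.sum + pvG (pvDs k nums) := by
  simp only [maximumValueSum]
  rw [pvFoldA k nums 0 []]
  simp only [List.nil_append, Int.zero_add]
  rw [pvLoopA_eq_G _ (by
    have := PySem.List.sorted_pairwise_rev (xs := pvDs k nums) (key := fun d => d)
    exact this)]
  rw [pvG_perm (PySem.List.sorted_perm (xs := pvDs k nums) (key := fun d => d) (rev := true))]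

theorem pvB_eq (nums : List Int) (k : Int) (edges : List (List Int)) :
    maximumValueSum_alt nums k edges = nums.sum + pvG (pvDs k nums) := by
  rw [maximumValueSum_alt]
  simp only [pvFoldB k nums 0 0 false none none]
  simp only [pvOMin, pvOMax, Bool.false_xor, Int.zero_add]
  by_cases h : (pvP (pvDs k nums)).length % 2 = 1
  · simp [pvG, h, Nat.mod_two_ne_zero.mpr h]
    cases (pvN (pvDs k nums)).max? <;> simp <;> ring
  · simp [pvG, h, Nat.mod_two_ne_one.mp h]

-- ===== VERDICT (by name: the statement is the Claim_ definition above) =====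
theorem maximumValueSum_spec : Claim_equal_maximumValueSum := by
  intro nums k edges _
  unfold Spec_maximumValueSum
  rw [pvA_eq nums k edges, pvB_eq nums k edges]
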